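-- pv_equiv track=rewrite | github.com/Wolfram-xx/Pcap2 | main.py | find_matching_intervals
-- ===== SOURCE A (Python) =====
-- def find_matching_intervals(packets1, packets2, min_seq):
--     """Находит совпадающие интервалы пакетов между двумя списками пакетов"""
--     matches = []
--     i, j = 0, 0
--
--     while i < len(packets1):
--         while j < len(packets2):
--             match_seq = []
--             start_i, start_j = i, j
--
--             while i < len(packets1) and j < len(packets2) and packets1[i][1] == packets2[j][1]:
--                 match_seq.append((packets1[i][0], packets2[j][0]))
--                 i += 1
--                 j += 1
--
--             if len(match_seq) >= min_seq:
--                 matches.append((start_i, start_j, match_seq))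
--
--             j += 1
--         i += 1
--         j = 0  # Сбрасываем j для нового прохода
--
--     return matches
-- ===== SOURCE B (Python) =====
-- def find_matching_intervals(packets1, packets2, min_seq):
--     """Same result as A, but run lengths come from a precomputed suffix-LCE
--     table (lce[i][j] = length of the common value run starting at (i, j)),
--     driven by one flat state-machine loop instead of three nested scans."""
--     n1, n2 = len(packets1), len(packets2)
--     if n1 == 0:
--         return []
--     # rows[i][j] built bottom-up: rows[i][j] = rows[i+1][j+1] + 1 on a value match
--     rows = [[0] * (n2 + 1)]
--     for i in range(n1 - 1, -1, -1):
--         nxt = rows[0]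
--         v = packets1[i][1]
--         row = [nxt[j + 1] + 1 if j < n2 and packets2[j][1] == v else 0
--                for j in range(n2 + 1)]
--         rows.insert(0, row)
--     matches = []
--     i = j = 0
--     while True:
--         if j < n2:
--             k = rows[i][j]
--             if k >= min_seq:
--                 seq = [(a[0], b[0]) for a, b in zip(packets1[i:i + k], packets2[j:j + k])]
--                 matches.append((i, j, seq))
--             i += k
--             j += k + 1
--         elif i + 1 < n1:
--             i += 1
--             j = 0
--         else:
--             break
--     return matches
-- ===== Notes on version B (the rewrite author's own statement) =====
-- stated objective: alternative
-- what changed: A re-scans runs element by element inside three nested while loops; B precomputes a suffix-LCE dynamic-programming table (lce[i][j] = length of the common value run starting at (i,j)) once and then drives a single flat state-machine loop that only looks run lengths up in the table.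
import Mathlib
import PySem

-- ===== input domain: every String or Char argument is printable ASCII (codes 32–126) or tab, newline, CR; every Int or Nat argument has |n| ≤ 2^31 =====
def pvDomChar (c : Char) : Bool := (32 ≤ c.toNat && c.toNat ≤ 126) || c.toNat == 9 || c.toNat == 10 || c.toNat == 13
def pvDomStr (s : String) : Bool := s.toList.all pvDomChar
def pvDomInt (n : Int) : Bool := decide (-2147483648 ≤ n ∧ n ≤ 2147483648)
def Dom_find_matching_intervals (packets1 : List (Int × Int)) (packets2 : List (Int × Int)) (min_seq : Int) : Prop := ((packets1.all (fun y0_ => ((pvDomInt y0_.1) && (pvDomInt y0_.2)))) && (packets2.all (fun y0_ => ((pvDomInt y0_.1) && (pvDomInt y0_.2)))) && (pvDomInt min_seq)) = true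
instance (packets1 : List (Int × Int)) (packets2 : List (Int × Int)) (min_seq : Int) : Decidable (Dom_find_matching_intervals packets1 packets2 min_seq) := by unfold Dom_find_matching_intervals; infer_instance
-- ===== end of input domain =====

-- B replaces A's three nested element-by-element scans by a precomputed suffix-LCE table
-- plus one flat state-machine loop (objective: alternative algorithm, similar cost).
-- The Nat "fuel" arguments below are pure totality guards: each loop's fuel is chosen
-- strictly larger than the number of iterations the loop can perform, so it never runs out.

-- ===== PORT A =====
-- innermost while: extends the current run, appending to match_seq and advancing i, j
def pvARun (p1 p2 : List (Int × Int)) : Nat → Nat → Nat → List (Int × Int) →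
    List (Int × Int) × Nat × Nat
  | 0, i, j, acc => (acc, i, j)
  | fuel+1, i, j, acc =>
      if i < p1.length ∧ j < p2.length ∧ (p1.getD i (0,0)).2 = (p2.getD j (0,0)).2 then
        pvARun p1 p2 fuel (i+1) (j+1) (acc ++ [((p1.getD i (0,0)).1, (p2.getD j (0,0)).1)])
      else (acc, i, j)

-- middle while over j (i is mutated by the run; returns final i alongside matches)
def pvAInner (p1 p2 : List (Int × Int)) (min_seq : Int) : Nat → Nat → Nat →
    List (Int × Int × List (Int × Int)) → List (Int × Int × List (Int × Int)) × Nat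
  | 0, i, _, acc => (acc, i)
  | fuel+1, i, j, acc =>
      if j < p2.length then
        let r := pvARun p1 p2 (p1.length+1) i j []
        pvAInner p1 p2 min_seq fuel r.2.1 (r.2.2 + 1)
          (if min_seq ≤ (r.1.length : Int) then acc ++ [((i : Int), (j : Int), r.1)] else acc)
      else (acc, i)

-- outer while over i (j reset to 0 each pass)
def pvAOuter (p1 p2 : List (Int × Int)) (min_seq : Int) : Nat → Nat →
    List (Int × Int × List (Int × Int)) → List (Int × Int × List (Int × Int))
  | 0, _, acc => acc
  | fuel+1, i, acc =>
      if i < p1.length then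
        pvAOuter p1 p2 min_seq fuel ((pvAInner p1 p2 min_seq (p2.length+1) i 0 acc).2 + 1)
          (pvAInner p1 p2 min_seq (p2.length+1) i 0 acc).1
      else acc

def find_matching_intervals (packets1 : List (Int × Int)) (packets2 : List (Int × Int)) (min_seq : Int) : List (Int × Int × (List (Int × Int))) :=
  pvAOuter packets1 packets2 min_seq (packets1.length+1) 0 []

-- ===== PORT B =====
-- one row of the suffix-LCE table: row[j] = nxt[j+1]+1 on a value match, else 0
def pvBRow (v : Int) (p2 : List (Int × Int)) (nxt : List Nat) : List Nat :=
  (List.range (p2.length + 1)).map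
    (fun j => if j < p2.length ∧ (p2.getD j (0,0)).2 = v then nxt.getD (j+1) 0 + 1 else 0)

-- Source B's bottom-up row loop: pvBRows fuel i = the rows for indices i..n1
def pvBRows (p1 p2 : List (Int × Int)) : Nat → Nat → List (List Nat)
  | 0, _ => [List.replicate (p2.length + 1) 0]
  | fuel+1, i =>
      if i < p1.length then
        let rest := pvBRows p1 p2 fuel (i+1)
        pvBRow (p1.getD i (0,0)).2 p2 (rest.headD []) :: rest
      else [List.replicate (p2.length + 1) 0]

-- the flat state-machine loop over (i, j), run lengths looked up in the table
def pvBLoop (p1 p2 : List (Int × Int)) (min_seq : Int) (rows : List (List Nat)) : Nat → Nat → Nat →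
    List (Int × Int × List (Int × Int)) → List (Int × Int × List (Int × Int))
  | 0, _, _, acc => acc
  | fuel+1, i, j, acc =>
      if j < p2.length then
        let k := (rows.getD i []).getD j 0
        pvBLoop p1 p2 min_seq rows fuel (i + k) (j + k + 1)
          (if min_seq ≤ (k : Int) then
            acc ++ [((i : Int), (j : Int),
              ((PySem.List.slice p1 (some (i:Int)) (some ((i:Int)+(k:Int)))).zip
                (PySem.List.slice p2 (some (j:Int)) (some ((j:Int)+(k:Int))))).map
                  (fun ab => (ab.1.1, ab.2.1)))]
           else acc)
      else if i + 1 < p1.length then pvBLoop p1 p2 min_seq rows fuel (i+1) 0 acc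
      else acc

def find_matching_intervals_alt (packets1 : List (Int × Int)) (packets2 : List (Int × Int)) (min_seq : Int) : List (Int × Int × (List (Int × Int))) :=
  if packets1.length = 0 then []
  else pvBLoop packets1 packets2 min_seq (pvBRows packets1 packets2 (packets1.length+1) 0)
    ((packets1.length+1) * (packets2.length+2)) 0 0 []

-- ===== PRECONDITION & SPEC =====
def Spec_find_matching_intervals (packets1 : List (Int × Int)) (packets2 : List (Int × Int)) (min_seq : Int) (out : List (Int × Int × (List (Int × Int)))) : Prop := out = find_matching_intervals_alt packets1 packets2 min_seq
instance (packets1 : List (Int × Int)) (packets2 : List (Int × Int)) (min_seq : Int) (out : List (Int × Int × (List (Int × Int)))) : Decidable (Spec_find_matching_intervals packets1 packets2 min_seq out) := by unfold Spec_find_matching_intervals; infer_instance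

-- ===== CLAIM (what is proved, stated in full; the proofs are below) =====
def Claim_equal_find_matching_intervals : Prop := ∀ (packets1 : List (Int × Int)) (packets2 : List (Int × Int)) (min_seq : Int), Dom_find_matching_intervals packets1 packets2 min_seq → Spec_find_matching_intervals packets1 packets2 min_seq (find_matching_intervals packets1 packets2 min_seq)

-- ===== LEMMAS AND PROOFS =====

-- the run starting at (i, j), as a standalone list (proof-side specification)
def pvRunSeq (p1 p2 : List (Int × Int)) (i j : Nat) : List (Int × Int) :=
  if h : i < p1.length ∧ j < p2.length ∧ (p1.getD i (0,0)).2 = (p2.getD j (0,0)).2 then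
    ((p1.getD i (0,0)).1, (p2.getD j (0,0)).1) :: pvRunSeq p1 p2 (i+1) (j+1)
  else []
termination_by p1.length - i
decreasing_by omega

-- the termination measure of B's flat loop
def pvM (n1 n2 i j : Nat) : Nat := (n1 - i) * (n2 + 2) + (n2 + 1 - j)

theorem pvM_lt_fuel (n1 n2 i j : Nat) : pvM n1 n2 i j < (n1 + 1) * (n2 + 2) := by
  unfold pvM
  have h2 : (n1 - i) * (n2+2) ≤ n1 * (n2+2) := Nat.mul_le_mul_right _ (Nat.sub_le _ _)
  have h3 : (n1+1) * (n2+2) = n1 * (n2+2) + (n2+2) := by ring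
  omega

theorem pvM_step1 (n1 n2 i j k : Nat) (hj : j < n2) :
    pvM n1 n2 (i+k) (j+k+1) < pvM n1 n2 i j := by
  unfold pvM
  have h2 : (n1 - (i+k)) * (n2+2) ≤ (n1 - i) * (n2+2) := Nat.mul_le_mul_right _ (by omega)
  omega

theorem pvM_step2 (n1 n2 i j : Nat) (hi : i + 1 < n1) :
    pvM n1 n2 (i+1) 0 < pvM n1 n2 i j := by
  unfold pvM
  have h0 : n1 - i = (n1 - (i+1)) + 1 := by omega
  have h2 : (n1 - i) * (n2+2) = (n1 - (i+1)) * (n2+2) + (n2+2) := by rw [h0]; ring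
  omega

theorem pvARun_eq (p1 p2 : List (Int × Int)) : ∀ (fuel i j : Nat) (acc : List (Int × Int)),
    p1.length - i < fuel →
    pvARun p1 p2 fuel i j acc =
      (acc ++ pvRunSeq p1 p2 i j, i + (pvRunSeq p1 p2 i j).length,
        j + (pvRunSeq p1 p2 i j).length) := by
  intro fuel
  induction fuel with
  | zero => intro i j acc hf; exact absurd hf (by omega)
  | succ fuel ih =>
      intro i j acc hf
      by_cases h : i < p1.length ∧ j < p2.length ∧ (p1.getD i (0,0)).2 = (p2.getD j (0,0)).2
      · rw [pvARun, if_pos h, pvRunSeq, dif_pos h, ih (i+1) (j+1) _ (by omega)]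
        simp only [List.append_assoc, List.singleton_append, List.length_cons, Prod.mk.injEq]
        exact ⟨trivial, by omega, by omega⟩
      · rw [pvARun, if_neg h, pvRunSeq, dif_neg h]
        simp

theorem pvRunSeq_len (p1 p2 : List (Int × Int)) (i j : Nat) :
    (pvRunSeq p1 p2 i j).length =
      if i < p1.length ∧ j < p2.length ∧ (p1.getD i (0,0)).2 = (p2.getD j (0,0)).2 then
        (pvRunSeq p1 p2 (i+1) (j+1)).length + 1 else 0 := by
  by_cases h : i < p1.length ∧ j < p2.length ∧ (p1.getD i (0,0)).2 = (p2.getD j (0,0)).2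
  · rw [pvRunSeq, dif_pos h, if_pos h]; simp
  · rw [pvRunSeq, dif_neg h, if_neg h]; simp

theorem pvAInner_stable (p1 p2 : List (Int × Int)) (min_seq : Int) :
    ∀ (f1 f2 i j : Nat) (acc : List (Int × Int × List (Int × Int))),
    p2.length - j < f1 → p2.length - j < f2 →
    pvAInner p1 p2 min_seq f1 i j acc = pvAInner p1 p2 min_seq f2 i j acc := by
  intro f1
  induction f1 with
  | zero => intro f2 i j acc h1 h2; exact absurd h1 (by omega)
  | succ f1 ih =>
      intro f2 i j acc h1 h2
      cases f2 with
      | zero => exact absurd h2 (by omega)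
      | succ f2 =>
          by_cases hj : j < p2.length
          · rw [pvAInner, if_pos hj, pvAInner, if_pos hj]
            rw [pvARun_eq p1 p2 (p1.length+1) i j [] (by omega)]
            simp only [Prod.fst, Prod.snd, List.nil_append]
            exact ih f2 _ _ _ (by omega) (by omega)
          · rw [pvAInner, if_neg hj, pvAInner, if_neg hj]

theorem pvAInner_i_le (p1 p2 : List (Int × Int)) (min_seq : Int) :
    ∀ (fuel i j : Nat) (acc : List (Int × Int × List (Int × Int))),
    i ≤ (pvAInner p1 p2 min_seq fuel i j acc).2 := by
  intro fuel
  induction fuel with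
  | zero => intro i j acc; exact le_refl i
  | succ fuel ih =>
      intro i j acc
      by_cases hj : j < p2.length
      · rw [pvAInner, if_pos hj]
        rw [pvARun_eq p1 p2 (p1.length+1) i j [] (by omega)]
        simp only [Prod.fst, Prod.snd, List.nil_append]
        exact le_trans (Nat.le_add_right i _) (ih _ _ _)
      · rw [pvAInner, if_neg hj]

theorem pvBRows_getD (p1 p2 : List (Int × Int)) : ∀ (fuel i0 d j : Nat),
    p1.length - i0 < fuel →
    ((pvBRows p1 p2 fuel i0).getD d []).getD j 0 = (pvRunSeq p1 p2 (i0 + d) j).length := by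
  intro fuel
  induction fuel with
  | zero => intro i0 d j hf; exact absurd hf (by omega)
  | succ fuel ih =>
      intro i0 d j hf
      by_cases h : i0 < p1.length
      · rw [pvBRows, if_pos h]
        cases d with
        | zero =>
            simp only [List.getD_cons_zero, Nat.add_zero, pvBRow]
            by_cases hj2 : j < p2.length + 1
            · rw [PySem.List.getD_map_range _ _ _ _ hj2, pvRunSeq_len]
              by_cases hc : j < p2.length ∧ (p2.getD j (0,0)).2 = (p1.getD i0 (0,0)).2
              · rw [if_pos hc, if_pos ⟨h, hc.1, hc.2.symm⟩]
                have hh : (pvBRows p1 p2 fuel (i0+1)).headD []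
                    = (pvBRows p1 p2 fuel (i0+1)).getD 0 [] := by
                  cases (pvBRows p1 p2 fuel (i0+1)) <;> rfl
                rw [hh, ih (i0+1) 0 (j+1) (by omega)]
              · rw [if_neg hc, if_neg (fun hcc => hc ⟨hcc.2.1, hcc.2.2.symm⟩)]
            · rw [List.getD_eq_default, pvRunSeq_len, if_neg (fun hcc => hj2 (by omega))]
              simp only [List.length_map, List.length_range]
              omega
        | succ d =>
            simp only [List.getD_cons_succ]
            have he : i0 + 1 + d = i0 + (d + 1) := by omega
            rw [ih (i0+1) d j (by omega), he]
      · rw [pvBRows, if_neg h, pvRunSeq_len, if_neg (fun hcc => h (by omega))]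
        cases d with
        | zero => simp
        | succ d => simp

theorem pvSliceZip (p1 p2 : List (Int × Int)) : ∀ (i j : Nat),
    ((PySem.List.slice p1 (some (i:Int)) (some ((i:Int)+((pvRunSeq p1 p2 i j).length:Int)))).zip
      (PySem.List.slice p2 (some (j:Int)) (some ((j:Int)+((pvRunSeq p1 p2 i j).length:Int))))).map
        (fun ab => (ab.1.1, ab.2.1)) = pvRunSeq p1 p2 i j := by
  intro i j
  induction i, j using pvRunSeq.induct p1 p2 with
  | case1 i j h ih =>
      rw [PySem.List.slice_natCast_add, PySem.List.slice_natCast_add] at ih ⊢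
      have hrs : pvRunSeq p1 p2 i j
          = ((p1.getD i (0,0)).1, (p2.getD j (0,0)).1) :: pvRunSeq p1 p2 (i+1) (j+1) := by
        rw [pvRunSeq, dif_pos h]
      rw [hrs]
      obtain ⟨h1, h2, hv⟩ := h
      rw [← List.getElem_cons_drop h1, ← List.getElem_cons_drop h2]
      simp only [List.length_cons, List.take_succ_cons, List.zip_cons_cons, List.map_cons]
      rw [List.getD_eq_getElem p1 (0,0) h1, List.getD_eq_getElem p2 (0,0) h2]
      exact congrArg _ ih
  | case2 i j h =>
      have hrs : pvRunSeq p1 p2 i j = [] := by rw [pvRunSeq, dif_neg h]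
      rw [hrs, PySem.List.slice_natCast_add, PySem.List.slice_natCast_add]
      simp

theorem pvBLoop_stable (p1 p2 : List (Int × Int)) (min_seq : Int) (rows : List (List Nat)) :
    ∀ (f1 f2 i j : Nat) (acc : List (Int × Int × List (Int × Int))),
    pvM p1.length p2.length i j < f1 → pvM p1.length p2.length i j < f2 →
    pvBLoop p1 p2 min_seq rows f1 i j acc = pvBLoop p1 p2 min_seq rows f2 i j acc := by
  intro f1
  induction f1 with
  | zero => intro f2 i j acc h1 h2; exact absurd h1 (by omega)
  | succ f1 ih =>
      intro f2 i j acc h1 h2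
      cases f2 with
      | zero => exact absurd h2 (by omega)
      | succ f2 =>
          by_cases hj : j < p2.length
          · rw [pvBLoop, if_pos hj, pvBLoop, if_pos hj]
            have hm := pvM_step1 p1.length p2.length i j ((rows.getD i []).getD j 0) hj
            exact ih f2 _ _ _ (by omega) (by omega)
          · rw [pvBLoop, if_neg hj, pvBLoop, if_neg hj]
            by_cases hi : i + 1 < p1.length
            · rw [if_pos hi, if_pos hi]
              have hm := pvM_step2 p1.length p2.length i j hi
              exact ih f2 _ _ _ (by omega) (by omega)
            · rw [if_neg hi, if_neg hi]

theorem pvLoop_inner (p1 p2 : List (Int × Int)) (min_seq : Int) :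
    ∀ (n fB i j : Nat) (acc : List (Int × Int × List (Int × Int))),
    p2.length - j ≤ n → pvM p1.length p2.length i j < fB →
    pvBLoop p1 p2 min_seq (pvBRows p1 p2 (p1.length+1) 0) fB i j acc =
      (if (pvAInner p1 p2 min_seq (p2.length+1) i j acc).2 + 1 < p1.length then
        pvBLoop p1 p2 min_seq (pvBRows p1 p2 (p1.length+1) 0) ((p1.length+1) * (p2.length+2))
          ((pvAInner p1 p2 min_seq (p2.length+1) i j acc).2 + 1) 0
          (pvAInner p1 p2 min_seq (p2.length+1) i j acc).1
      else (pvAInner p1 p2 min_seq (p2.length+1) i j acc).1) := by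
  intro n
  induction n with
  | zero =>
      intro fB i j acc hn hm
      have hj : ¬ j < p2.length := by omega
      cases fB with
      | zero => exact absurd hm (by omega)
      | succ fB =>
          rw [pvAInner, if_neg hj, pvBLoop, if_neg hj]
          by_cases h2 : i + 1 < p1.length
          · rw [if_pos h2]
            simp only [if_pos h2]
            refine pvBLoop_stable p1 p2 min_seq _ fB _ (i+1) 0 acc ?_ ?_
            · have hm2 := pvM_step2 p1.length p2.length i j h2
              omega
            · exact pvM_lt_fuel p1.length p2.length (i+1) 0
          · rw [if_neg h2]
            simp only [if_neg h2]
  | succ n ihn =>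
      intro fB i j acc hn hm
      by_cases hj : j < p2.length
      · cases fB with
        | zero => exact absurd hm (by omega)
        | succ fB =>
            rw [pvBLoop, if_pos hj, pvAInner, if_pos hj]
            rw [pvARun_eq p1 p2 (p1.length+1) i j [] (by omega)]
            have hk : ((pvBRows p1 p2 (p1.length+1) 0).getD i []).getD j 0
                = (pvRunSeq p1 p2 i j).length := by
              have := pvBRows_getD p1 p2 (p1.length+1) 0 i j (by omega)
              simpa using this
            simp only [hk, Prod.fst, Prod.snd, List.nil_append]
            rw [pvSliceZip p1 p2 i j]
            rw [pvAInner_stable p1 p2 min_seq p2.length (p2.length+1)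
              (i + (pvRunSeq p1 p2 i j).length) (j + (pvRunSeq p1 p2 i j).length + 1)
              (if min_seq ≤ ((pvRunSeq p1 p2 i j).length : Int) then
                acc ++ [((i : Int), (j : Int), pvRunSeq p1 p2 i j)] else acc)
              (by omega) (by omega)]
            have hm1 := pvM_step1 p1.length p2.length i j (pvRunSeq p1 p2 i j).length hj
            exact ihn fB _ _ _ (by omega) (by omega)
      · cases fB with
        | zero => exact absurd hm (by omega)
        | succ fB =>
            rw [pvAInner, if_neg hj, pvBLoop, if_neg hj]
            by_cases h2 : i + 1 < p1.length
            · rw [if_pos h2]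
              simp only [if_pos h2]
              refine pvBLoop_stable p1 p2 min_seq _ fB _ (i+1) 0 acc ?_ ?_
              · have hm2 := pvM_step2 p1.length p2.length i j h2
                omega
              · exact pvM_lt_fuel p1.length p2.length (i+1) 0
            · rw [if_neg h2]
              simp only [if_neg h2]

theorem pvAOuter_terminal (p1 p2 : List (Int × Int)) (min_seq : Int) :
    ∀ (fuel i : Nat) (acc : List (Int × Int × List (Int × Int))), ¬ i < p1.length →
    pvAOuter p1 p2 min_seq fuel i acc = acc := by
  intro fuel i acc hi
  cases fuel with
  | zero => rfl
  | succ fuel => rw [pvAOuter, if_neg hi]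

theorem pvAOuter_stable (p1 p2 : List (Int × Int)) (min_seq : Int) :
    ∀ (f1 f2 i : Nat) (acc : List (Int × Int × List (Int × Int))),
    p1.length - i < f1 → p1.length - i < f2 →
    pvAOuter p1 p2 min_seq f1 i acc = pvAOuter p1 p2 min_seq f2 i acc := by
  intro f1
  induction f1 with
  | zero => intro f2 i acc h1 h2; exact absurd h1 (by omega)
  | succ f1 ih =>
      intro f2 i acc h1 h2
      cases f2 with
      | zero => exact absurd h2 (by omega)
      | succ f2 =>
          by_cases hi : i < p1.length
          · rw [pvAOuter, if_pos hi, pvAOuter, if_pos hi]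
            have hle := pvAInner_i_le p1 p2 min_seq (p2.length+1) i 0 acc
            exact ih f2 _ _ (by omega) (by omega)
          · rw [pvAOuter, if_neg hi, pvAOuter, if_neg hi]

theorem pvLoop_outer (p1 p2 : List (Int × Int)) (min_seq : Int) :
    ∀ (n i : Nat) (acc : List (Int × Int × List (Int × Int))),
    p1.length - i ≤ n → i < p1.length →
    pvBLoop p1 p2 min_seq (pvBRows p1 p2 (p1.length+1) 0) ((p1.length+1) * (p2.length+2)) i 0 acc
      = pvAOuter p1 p2 min_seq (p1.length+1) i acc := by
  intro n
  induction n with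
  | zero => intro i acc hn hi; exact absurd hi (by omega)
  | succ n ihn =>
      intro i acc hn hi
      rw [pvAOuter, if_pos hi]
      rw [pvLoop_inner p1 p2 min_seq p2.length _ i 0 acc (by omega)
        (pvM_lt_fuel p1.length p2.length i 0)]
      have hle := pvAInner_i_le p1 p2 min_seq (p2.length+1) i 0 acc
      by_cases h2 : (pvAInner p1 p2 min_seq (p2.length+1) i 0 acc).2 + 1 < p1.length
      · rw [if_pos h2, ihn _ _ (by omega) h2]
        exact pvAOuter_stable p1 p2 min_seq (p1.length+1) p1.length _ _ (by omega) (by omega)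
      · rw [if_neg h2, pvAOuter_terminal p1 p2 min_seq p1.length _ _ h2]

-- ===== VERDICT (by name: the statement is the Claim_ definition above) =====
theorem find_matching_intervals_spec : Claim_equal_find_matching_intervals := by
  intro p1 p2 min_seq _dom
  unfold Spec_find_matching_intervals find_matching_intervals find_matching_intervals_alt
  by_cases h : p1.length = 0
  · rw [if_pos h, pvAOuter, if_neg (by omega)]
  · rw [if_neg h]
    exact (pvLoop_outer p1 p2 min_seq p1.length 0 [] (by omega) (by omega)).symm
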